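-- pv_equiv track=rewrite | github.com/totalcream/BOJ_Python | CTP_2023_BRD/31846.py | max_folding_score
-- ===== SOURCE A (Python) =====
-- def max_folding_score(s):
--     n = len(s)
--     max_score = 0
--
--     for i in range(1, n):
--         left = s[:i][::-1]
--         right = s[i:]
--         score = sum(1 for x, y in zip(left, right) if x == y)
--         max_score = max(max_score, score)
--
--     return max_score
-- ===== SOURCE B (Python) =====
-- def max_folding_score(s):
--     n = len(s)
--     counts = [0] * n
--     for k in range(n):
--         for j in range(k):
--             if (j + k) % 2 == 1 and s[j] == s[k]:
--                 counts[(j + k + 1) // 2] += 1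
--     return max(counts, default=0)
-- ===== Notes on version B (the rewrite author's own statement) =====
-- stated objective: alternative
-- what changed: Instead of A's per-fold-point scan (reverse the prefix, zip with the suffix, count matches, running max), B makes one sweep over all index pairs (j,k), tallies each matching pair with odd j+k into a per-fold-center bucket array, and returns the max bucket.
import Mathlib
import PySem

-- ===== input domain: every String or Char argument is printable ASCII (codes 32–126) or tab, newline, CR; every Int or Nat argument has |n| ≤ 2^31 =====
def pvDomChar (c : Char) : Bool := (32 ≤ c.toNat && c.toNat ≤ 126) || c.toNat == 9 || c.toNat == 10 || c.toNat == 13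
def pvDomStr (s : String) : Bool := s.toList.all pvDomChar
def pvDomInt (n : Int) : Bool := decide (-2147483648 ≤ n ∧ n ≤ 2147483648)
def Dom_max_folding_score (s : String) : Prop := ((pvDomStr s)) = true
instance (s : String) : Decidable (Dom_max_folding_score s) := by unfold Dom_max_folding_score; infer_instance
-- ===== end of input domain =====

-- B replaces A's per-fold-point zip scan by a single sweep over all index pairs that tallies
-- each matching odd-sum pair into its fold-center bucket (objective: alternative algorithm).

-- ===== PORT A =====
-- for i in range(1, n): score = matches of s[:i][::-1] against s[i:]; running max.
def max_folding_score (s : String) : Int :=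
  let cs := s.toList
  let n : Int := PySem.List.len cs
  (PySem.List.pyRange 1 n 1).foldl (fun max_score i =>
    -- left = s[:i][::-1] ([::-1] is reverse, PySem.List.slice?_none_none_neg_one); right = s[i:]
    let left := (PySem.List.slice cs none (some i)).reverse
    let right := PySem.List.slice cs (some i) none
    -- score = sum(1 for x, y in zip(left, right) if x == y)
    let score : Int := (left.zip right).foldl (fun acc p => if p.1 == p.2 then acc + 1 else acc) 0
    max max_score score) 0

-- ===== PORT B =====
-- counts = [0]*n; for k in range(n): for j in range(k): tally matching odd-sum pairs; max(counts, default=0)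
def max_folding_score_alt (s : String) : Int :=
  let cs := s.toList
  let n : Int := PySem.List.len cs
  let counts : List Int := PySem.List.pyRepeat [(0 : Int)] n
  let counts := (PySem.List.pyRange 0 n 1).foldl (fun counts k =>
    (PySem.List.pyRange 0 k 1).foldl (fun counts j =>
      if PySem.Int.mod (j + k) 2 = 1 ∧ PySem.List.pyGetD cs j ' ' = PySem.List.pyGetD cs k ' ' then
        -- counts[(j+k+1)//2] += 1 ; the index is always in range: 1 ≤ (j+k+1)//2 ≤ k < n
        PySem.List.pySetD counts (PySem.Int.floordiv (j + k + 1) 2)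
          (PySem.List.pyGetD counts (PySem.Int.floordiv (j + k + 1) 2) 0 + 1)
      else counts) counts) counts
  -- max(counts, default=0)
  match PySem.List.max? counts (fun x => x) with
  | some m => m
  | none => 0

-- ===== PRECONDITION & SPEC =====
def Spec_max_folding_score (s : String) (out : Int) : Prop := out = max_folding_score_alt s
instance (s : String) (out : Int) : Decidable (Spec_max_folding_score s out) := by unfold Spec_max_folding_score; infer_instance

-- ===== CLAIM (what is proved, stated in full; the proofs are below) =====
def Claim_equal_max_folding_score : Prop := ∀ (s : String), Dom_max_folding_score s → Spec_max_folding_score s (max_folding_score s)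

-- ===== LEMMAS AND PROOFS =====

-- the common score: number of matching mirror pairs around fold point i
def pvScore (cs : List Char) (i : Nat) : Nat :=
  (List.range (min i (cs.length - i))).countP
    (fun m => cs.getD (i - 1 - m) ' ' == cs.getD (i + m) ' ')

-- the fold-center buckets B's pair sweep produces, in sweep order
def pvBuckets (cs : List Char) : List Nat :=
  (List.range cs.length).flatMap (fun k =>
    ((List.range k).filter
        (fun j => decide ((j + k) % 2 = 1 ∧ cs.getD j ' ' = cs.getD k ' '))).map
      (fun j => (j + k + 1) / 2))

-- counts[b] += 1
def pvBump (c : List Int) (b : Nat) : List Int := c.set b (c.getD b 0 + 1)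

theorem pvBump_getD (c : List Int) (b i : Nat) (hb : b < c.length) :
    (pvBump c b).getD i 0 = c.getD i 0 + if i = b then 1 else 0 := by
  unfold pvBump
  rcases Nat.lt_or_ge i c.length with h | h
  · rw [List.getD_eq_getElem c 0 h, List.getD_eq_getElem _ 0 (by simpa using h),
      List.getElem_set]
    split_ifs with h1 h2 h2
    · subst h1; rw [List.getD_eq_getElem c 0 hb]
    · omega
    · omega
    · ring
  · rw [List.getD_eq_default _ _ (by simpa using h), List.getD_eq_default _ _ h]
    have : i ≠ b := by omega
    simp [this]

theorem pvFoldlBump_getD (l : List Nat) (c : List Int) (i : Nat)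
    (h : ∀ b ∈ l, b < c.length) :
    (l.foldl pvBump c).getD i 0 = c.getD i 0 + l.count i := by
  induction l generalizing c with
  | nil => simp
  | cons b t ih =>
    rw [List.foldl_cons, ih _ (fun x hx => by simpa [pvBump] using h x (List.mem_cons_of_mem _ hx)),
      pvBump_getD c b i (h b (List.mem_cons_self ..))]
    rw [List.count_cons]
    by_cases hib : i = b <;> simp [hib, beq_iff_eq] <;> omega

theorem pvFoldlBump_length (l : List Nat) (c : List Int) :
    (l.foldl pvBump c).length = c.length := by
  induction l generalizing c with
  | nil => rfl
  | cons b t ih => simp [List.foldl_cons, ih, pvBump]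

theorem pvCountP_range_shift (P : Nat → Bool) (n i M : Nat) (hM : i + M ≤ n)
    (hs : ∀ k, P k = true → i ≤ k ∧ k < i + M) :
    (List.range n).countP P = (List.range M).countP (fun m => P (i + m)) := by
  obtain ⟨r, hr⟩ : ∃ r, n = (i + M) + r := ⟨n - (i + M), by omega⟩
  subst hr
  rw [List.range_add, List.countP_append, List.range_add, List.countP_append,
    List.countP_map, List.countP_map]
  have h1 : (List.range i).countP P = 0 := by
    rw [List.countP_eq_zero]; intro a ha hP
    have := hs a hP; have := List.mem_range.mp ha; omega
  have h2 : (List.range r).countP (P ∘ fun x => i + M + x) = 0 := by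
    rw [List.countP_eq_zero]; intro a _ hP
    have := hs _ hP; simp only [Function.comp_def] at hP this ⊢; omega
  simp [h1, Function.comp_def]
  intro a ha
  exact Bool.eq_false_iff.mpr (fun hP => by have := hs _ hP; omega)

theorem pvMem_buckets (cs : List Char) (b : Nat) (hb : b ∈ pvBuckets cs) :
    1 ≤ b ∧ b < cs.length := by
  simp only [pvBuckets, List.mem_flatMap, List.mem_map, List.mem_filter,
    List.mem_range, decide_eq_true_eq] at hb
  obtain ⟨k, hk, j, ⟨hj, hodd, _⟩, rfl⟩ := hb
  omega

-- per-k inner count: the bucket-i pairs ending at k number 0 or 1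

theorem pvInner_count (cs : List Char) (i k : Nat) :
    (((List.range k).filter
        (fun j => decide ((j + k) % 2 = 1 ∧ cs.getD j ' ' = cs.getD k ' '))).map
      (fun j => (j + k + 1) / 2)).count i =
    if i ≤ k ∧ k + 1 ≤ 2 * i ∧ cs.getD (2 * i - 1 - k) ' ' = cs.getD k ' '
    then 1 else 0 := by
  rw [List.count_eq_countP, List.countP_map, List.countP_filter]
  by_cases hk : k + 1 ≤ 2 * i
  · by_cases hc : cs.getD (2 * i - 1 - k) ' ' = cs.getD k ' '
    · rw [List.countP_congr (q := fun j => j == 2 * i - 1 - k) ?_,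
        ← List.count_eq_countP, List.count_range]
      · have hik : (2 * i - 1 - k < k) ↔ (i ≤ k) := by omega
        split_ifs with hA hB hB
        · rfl
        · exact absurd ⟨hik.mp hA, hk, hc⟩ hB
        · exact absurd (hik.mpr hB.1) hA
        · rfl
      · intro j hj
        have hjk := List.mem_range.mp hj
        simp only [Function.comp, beq_iff_eq, Bool.and_eq_true, decide_eq_true_eq]
        constructor
        · rintro ⟨hdiv, hmod, hcs⟩; omega
        · rintro rfl
          refine ⟨by omega, by omega, ?_⟩
          exact hc
    · rw [List.countP_eq_zero.mpr, if_neg (by tauto)]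
      intro j hj hP
      simp only [Function.comp, beq_iff_eq, Bool.and_eq_true, decide_eq_true_eq] at hP
      obtain ⟨hdiv, hmod, hcs⟩ := hP
      have hj' : j = 2 * i - 1 - k := by omega
      exact hc (hj' ▸ hcs)
  · rw [List.countP_eq_zero.mpr, if_neg (by omega)]
    intro j hj hP
    simp only [Function.comp, beq_iff_eq, Bool.and_eq_true, decide_eq_true_eq] at hP
    have := List.mem_range.mp hj
    omega

theorem pvSum_ite (l : List Nat) (C : Nat → Prop) [DecidablePred C] :
    (l.map (fun k => if C k then 1 else 0)).sum = l.countP (fun k => decide (C k)) := by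
  induction l with
  | nil => rfl
  | cons a t ih =>
    rw [List.map_cons, List.sum_cons, ih, List.countP_cons]
    by_cases h : C a <;> simp [h]
    omega

theorem pvCount_buckets_zero (cs : List Char) : (pvBuckets cs).count 0 = 0 := by
  unfold pvBuckets
  rw [List.count_flatMap]
  have : ∀ k ∈ List.range cs.length,
      ((List.count 0 ∘ fun k =>
        ((List.range k).filter
            (fun j => decide ((j + k) % 2 = 1 ∧ cs.getD j ' ' = cs.getD k ' '))).map
          (fun j => (j + k + 1) / 2))) k = 0 := by
    intro k _
    simp only [Function.comp]
    rw [pvInner_count]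
    simp
  rw [List.map_congr_left this]
  simp

theorem pvCount_buckets (cs : List Char) (i : Nat) (h2 : i < cs.length) :
    (pvBuckets cs).count i = pvScore cs i := by
  unfold pvBuckets
  rw [List.count_flatMap]
  have hmap : ∀ k ∈ List.range cs.length,
      ((List.count i ∘ fun k =>
        ((List.range k).filter
            (fun j => decide ((j + k) % 2 = 1 ∧ cs.getD j ' ' = cs.getD k ' '))).map
          (fun j => (j + k + 1) / 2))) k =
      (fun k => if i ≤ k ∧ k + 1 ≤ 2 * i ∧ cs.getD (2 * i - 1 - k) ' ' = cs.getD k ' '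
        then 1 else 0) k := by
    intro k _
    simp only [Function.comp]
    rw [pvInner_count]
  rw [List.map_congr_left hmap, pvSum_ite]
  rw [List.countP_congr (q := fun k => decide (k < cs.length ∧ i ≤ k ∧ k + 1 ≤ 2 * i ∧
    cs.getD (2 * i - 1 - k) ' ' = cs.getD k ' ')) ?hq]
  case hq =>
    intro k hk
    have := List.mem_range.mp hk
    simp only [decide_eq_true_eq]
    tauto
  rw [pvCountP_range_shift _ cs.length i (min i (cs.length - i)) (by omega) ?hs]
  case hs =>
    intro k hk
    simp only [decide_eq_true_eq] at hk
    omega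
  unfold pvScore
  apply List.countP_congr
  intro m hm
  have hmM := List.mem_range.mp hm
  have hmi : m < i := by omega
  simp only [decide_eq_true_eq, beq_iff_eq]
  have hidx : 2 * i - 1 - (i + m) = i - 1 - m := by omega
  rw [hidx]
  constructor
  · rintro ⟨_, _, _, h⟩; exact h
  · intro h; exact ⟨by omega, by omega, by omega, h⟩

theorem pvZip_list (cs : List Char) (i : Nat) (hi : i ≤ cs.length) :
    (cs.take i).reverse.zip (cs.drop i) =
      (List.range (min i (cs.length - i))).map
        (fun m => (cs.getD (i - 1 - m) ' ', cs.getD (i + m) ' ')) := by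
  apply List.ext_getElem
  · simp [List.length_zip]
    try omega
  · intro m hm1 hm2
    have hlen : (List.range (min i (cs.length - i))).length = min i (cs.length - i) := by simp
    have hmM : m < min i (cs.length - i) := by
      simpa using hm2
    have hmi : m < i := by omega
    have h1 : i - 1 - m < cs.length := by omega
    have h2 : i + m < cs.length := by omega
    rw [List.getElem_map, List.getElem_zip, List.getElem_range]
    congr 1
    · rw [List.getElem_reverse, List.getElem_take, List.getD_eq_getElem _ _ h1]
      congr 1
      simp
      omega
    · rw [List.getElem_drop, List.getD_eq_getElem _ _ h2]

theorem pvZip_count (cs : List Char) (i : Nat) (hi : i ≤ cs.length) :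
    ((cs.take i).reverse.zip (cs.drop i)).countP (fun p => p.1 == p.2) = pvScore cs i := by
  rw [pvZip_list cs i hi, List.countP_map]
  rfl

theorem pvA_eq (s : String) :
    max_folding_score s =
      ((List.range (s.toList.length - 1)).map
        (fun m => (pvScore s.toList (m + 1) : Int))).foldl max 0 := by
  unfold max_folding_score
  simp only
  rw [PySem.List.pyRange_one]
  have hL : ((PySem.List.len s.toList) - 1).toNat = s.toList.length - 1 := by
    simp [PySem.List.len_eq]
  rw [hL, List.foldl_map, List.foldl_map]
  apply PySem.List.foldl_congr_mem
  intro acc k hk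
  have hkL : k < s.toList.length - 1 := List.mem_range.mp hk
  have hcast : (1 : Int) + (k : Int) = ((k + 1 : Nat) : Int) := by push_cast; ring
  rw [hcast, PySem.List.slice_to_natCast, PySem.List.slice_from_natCast,
    PySem.List.foldl_if_add_one, pvZip_count _ _ (by omega)]
  simp

theorem pvB_counts (s : String) :
    (PySem.List.pyRange 0 (PySem.List.len s.toList) 1).foldl (fun counts k =>
      (PySem.List.pyRange 0 k 1).foldl (fun counts j =>
        if PySem.Int.mod (j + k) 2 = 1 ∧
            PySem.List.pyGetD s.toList j ' ' = PySem.List.pyGetD s.toList k ' ' then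
          PySem.List.pySetD counts (PySem.Int.floordiv (j + k + 1) 2)
            (PySem.List.pyGetD counts (PySem.Int.floordiv (j + k + 1) 2) 0 + 1)
        else counts) counts) (List.replicate s.toList.length (0 : Int)) =
    (pvBuckets s.toList).foldl pvBump (List.replicate s.toList.length (0 : Int)) := by
  unfold pvBuckets
  rw [PySem.List.len_eq, PySem.List.pyRange_zero_nat, List.foldl_flatMap]
  simp only [List.foldl_map]
  apply PySem.List.foldl_congr_mem
  intro c k _
  rw [PySem.List.pyRange_zero_nat, List.foldl_map]
  have hbody : ∀ (c : List Int) (j : Nat), j ∈ List.range k →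
      (if PySem.Int.mod ((j : Int) + k) 2 = 1 ∧
          PySem.List.pyGetD s.toList (j : Int) ' ' = PySem.List.pyGetD s.toList (k : Int) ' ' then
        PySem.List.pySetD c (PySem.Int.floordiv ((j : Int) + k + 1) 2)
          (PySem.List.pyGetD c (PySem.Int.floordiv ((j : Int) + k + 1) 2) 0 + 1)
      else c) =
      (if (j + k) % 2 = 1 ∧ s.toList.getD j ' ' = s.toList.getD k ' '
        then pvBump c ((j + k + 1) / 2) else c) := by
    intro c j _
    have hdiv : PySem.Int.floordiv ((j:Int) + k + 1) 2 = (((j+k+1)/2 : Nat) : Int) := by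
      rw [PySem.Int.floordiv_eq_ediv_of_pos (by omega)]; push_cast; omega
    have hcond : (PySem.Int.mod ((j:Int) + k) 2 = 1 ∧
        PySem.List.pyGetD s.toList (j : Int) ' ' = PySem.List.pyGetD s.toList (k : Int) ' ') ↔
        ((j + k) % 2 = 1 ∧ s.toList.getD j ' ' = s.toList.getD k ' ') := by
      rw [PySem.Int.mod_eq_emod_of_pos (by omega), PySem.List.pyGetD_natCast,
        PySem.List.pyGetD_natCast]
      constructor <;> rintro ⟨h1, h2⟩ <;> exact ⟨by omega, h2⟩
    by_cases h : (j + k) % 2 = 1 ∧ s.toList.getD j ' ' = s.toList.getD k ' '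
    · rw [if_pos (hcond.mpr h), if_pos h, hdiv, PySem.List.pySetD_natCast,
        PySem.List.pyGetD_natCast]
      rfl
    · rw [if_neg (fun hh => h (hcond.mp hh)), if_neg h]
  exact (PySem.List.foldl_congr_mem (List.range k) _ _ c
      (fun acc j hj => hbody acc j hj)).trans
    (PySem.List.foldl_ite_eq_foldl_filter _ _ _ _)

theorem pvC_eq (cs : List Char) :
    (pvBuckets cs).foldl pvBump (List.replicate cs.length (0:Int)) =
    (List.range cs.length).map (fun i => ((pvBuckets cs).count i : Int)) := by
  apply List.ext_getElem
  · rw [pvFoldlBump_length]; simp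
  · intro i h1 h2
    have hiL : i < cs.length := by rw [pvFoldlBump_length, List.length_replicate] at h1; exact h1
    rw [← List.getD_eq_getElem _ 0 h1, pvFoldlBump_getD _ _ _ (fun b hb => by
        rw [List.length_replicate]; exact (pvMem_buckets cs b hb).2)]
    simp

theorem pvB_eq (s : String) :
    max_folding_score_alt s =
      ((List.range (s.toList.length - 1)).map
        (fun m => (pvScore s.toList (m + 1) : Int))).foldl max 0 := by
  unfold max_folding_score_alt
  simp only
  have hrep : PySem.List.pyRepeat [(0:Int)] (PySem.List.len s.toList) =
      List.replicate s.toList.length (0:Int) := by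
    rw [PySem.List.pyRepeat_singleton]
    simp [PySem.List.len_eq]
  rw [hrep, pvB_counts, pvC_eq]
  cases hL : s.toList.length with
  | zero => simp [PySem.List.max?]
  | succ M =>
    rw [List.range_succ_eq_map, List.map_cons, List.map_map, pvCount_buckets_zero]
    rw [PySem.List.max?_id_cons]
    simp only [Nat.cast_zero, Nat.succ_sub_one]
    congr 1
    apply List.map_congr_left
    intro m hm
    have hmM := List.mem_range.mp hm
    simp only [Function.comp]
    rw [pvCount_buckets s.toList (m + 1) (by omega)]

-- ===== VERDICT (by name: the statement is the Claim_ definition above) =====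
theorem max_folding_score_spec : Claim_equal_max_folding_score := by
  intro s _
  unfold Spec_max_folding_score
  rw [pvA_eq, pvB_eq]
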